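-- pv_equiv track=rewrite | github.com/Yash1hi/Advent-Of-Code-2023 | Day1/Day1.py | isANum
-- ===== SOURCE A (Python) =====
-- def isANum(line, index):
--     '''
--     str line - Line of input file
--     int index - Index of the line that we would like to check for digit
--     '''
--
--     # List of digits as strings and their mapping to ints
--     digitsAsWords = ["one","two","three","four","five","six","seven","eight","nine"]
--     digMap = {"one" : 1,
--               "two" : 2,
--               "three" : 3,
--               "four" : 4,
--               "five" : 5,
--               "six" : 6,
--               "seven" : 7,
--               "eight" : 8,
--               "nine" : 9}
--
--     # Instant return if digit
--     if line[index].isdigit():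
--         return True, int(line[index])
--
--     for word in digitsAsWords:
--         if recurWord(word, line[index:]):
--             return True, digMap[word]
--     return False, -1
--
-- def recurWord(word, line):
--     '''
--     str word - string of number to check against
--     str line - line beginning with the index to check
--     '''
--     if word == "":
--         return True
--     elif line == "" or word[0] != line[0]:
--         return False
--     elif line[0] == word[0]:
--         return recurWord(word[1:], line[1:])
-- ===== SOURCE B (Python) =====
-- DIG_MAP = {"one": 1, "two": 2, "three": 3, "four": 4, "five": 5,
--            "six": 6, "seven": 7, "eight": 8, "nine": 9}
--
-- def isANum(line, index):
--     ch = line[index]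
--     if ch.isdigit():
--         return True, int(ch)
--     rest = line[index:]
--     for length in (3, 4, 5):
--         val = DIG_MAP.get(rest[:length])
--         if val is not None:
--             return True, val
--     return False, -1
-- ===== Notes on version B (the rewrite author's own statement) =====
-- stated objective: simpler
-- what changed: B replaces A's nine-word scan with a recursive per-character prefix matcher by three fixed-length slices of the tail looked up in the word-to-digit dict.
import Mathlib
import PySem

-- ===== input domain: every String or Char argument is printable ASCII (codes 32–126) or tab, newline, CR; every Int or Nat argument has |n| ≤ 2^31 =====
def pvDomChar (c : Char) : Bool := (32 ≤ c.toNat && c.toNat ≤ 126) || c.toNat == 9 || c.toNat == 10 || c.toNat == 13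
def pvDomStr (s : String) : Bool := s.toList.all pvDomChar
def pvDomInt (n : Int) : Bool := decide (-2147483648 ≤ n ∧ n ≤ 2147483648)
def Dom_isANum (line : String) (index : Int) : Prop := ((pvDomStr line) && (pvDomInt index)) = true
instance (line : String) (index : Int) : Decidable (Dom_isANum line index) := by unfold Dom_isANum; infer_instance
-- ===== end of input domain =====

-- B replaces A's recursive per-character matcher over all nine number words by three fixed-length
-- slices looked up in the word→digit dict; objective: simpler (no recursion, no word scan).

-- ===== PORT A =====
-- recurWord(word, line): per-character recursive prefix matcher
def recurWordA (word line : List Char) : Bool :=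
  match word, line with
  | [], _ => true
  | _ :: _, [] => false
  | w :: ws, l :: ls => if w ≠ l then false else recurWordA ws ls

def wordsA : List (List Char) :=
  [['o','n','e'], ['t','w','o'], ['t','h','r','e','e'], ['f','o','u','r'],
   ['f','i','v','e'], ['s','i','x'], ['s','e','v','e','n'], ['e','i','g','h','t'],
   ['n','i','n','e']]

def digMapA : PySem.Dict (List Char) Int :=
  ((((((((PySem.Dict.empty.insert ['o','n','e'] 1).insert ['t','w','o'] 2).insert
      ['t','h','r','e','e'] 3).insert ['f','o','u','r'] 4).insert ['f','i','v','e'] 5).insert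
      ['s','i','x'] 6).insert ['s','e','v','e','n'] 7).insert ['e','i','g','h','t'] 8).insert
      ['n','i','n','e'] 9

-- the 'for word in digitsAsWords' loop of A
def loopA (ws : List (List Char)) (rest : List Char) : Bool × Int :=
  match ws with
  | [] => (false, -1)
  | w :: t => if recurWordA w rest then (true, (digMapA.get? w).getD 0) else loopA t rest

def isANum (line : String) (index : Int) : Bool × Int :=
  match PySem.List.pyGet? line.toList index with
  | none => (false, -1)   -- line[index] raises IndexError in Python: excluded by Pre_isANum
  | some c =>
    if PySem.Chars.strIsdigit [c] then (true, (PySem.Int.ofChars? [c]).getD 0)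
    else loopA wordsA (PySem.List.slice line.toList (some index) none)

-- ===== PORT B =====
def digMapB : PySem.Dict (List Char) Int :=
  ((((((((PySem.Dict.empty.insert ['o','n','e'] 1).insert ['t','w','o'] 2).insert
      ['t','h','r','e','e'] 3).insert ['f','o','u','r'] 4).insert ['f','i','v','e'] 5).insert
      ['s','i','x'] 6).insert ['s','e','v','e','n'] 7).insert ['e','i','g','h','t'] 8).insert
      ['n','i','n','e'] 9

-- the 'for length in (3, 4, 5)' loop of B; rest[:length] is rest.take length
def loopB (lens : List Nat) (rest : List Char) : Bool × Int :=
  match lens with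
  | [] => (false, -1)
  | L :: t =>
    match digMapB.get? (rest.take L) with
    | some v => (true, v)
    | none => loopB t rest

def isANum_alt (line : String) (index : Int) : Bool × Int :=
  match PySem.List.pyGet? line.toList index with
  | none => (false, -1)   -- line[index] raises IndexError in Python: excluded by Pre_isANum
  | some c =>
    if PySem.Chars.strIsdigit [c] then (true, (PySem.Int.ofChars? [c]).getD 0)
    else loopB [3, 4, 5] (PySem.List.slice line.toList (some index) none)

-- ===== PRECONDITION & SPEC =====
-- Pre_ excludes exactly the inputs where line[index] raises IndexError (both programs raise there).
def Pre_isANum (line : String) (index : Int) : Prop :=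
  PySem.Raise.InRange line.toList.length index
instance (line : String) (index : Int) : Decidable (Pre_isANum line index) := by
  unfold Pre_isANum; infer_instance

def pvWitness_isANum : String × Int := ("x7one", 1)

def Spec_isANum (line : String) (index : Int) (out : Bool × Int) : Prop := out = isANum_alt line index
instance (line : String) (index : Int) (out : Bool × Int) : Decidable (Spec_isANum line index out) := by unfold Spec_isANum; infer_instance

-- ===== CLAIM (what is proved, stated in full; the proofs are below) =====
def Claim_equal_isANum : Prop := ∀ (line : String) (index : Int), Dom_isANum line index → Pre_isANum line index → Spec_isANum line index (isANum line index)

-- ===== LEMMAS AND PROOFS =====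

-- A's recursive matcher decides the prefix relation
theorem recurWordA_eq (word : List Char) : ∀ line, recurWordA word line = decide (word <+: line) := by
  induction word with
  | nil => intro line; simp [recurWordA]
  | cons w ws ih =>
    intro line
    cases line with
    | nil => simp [recurWordA]
    | cons l ls =>
      by_cases h : w = l
      · subst h
        simp [recurWordA, ih, List.cons_prefix_cons]
      · simp [recurWordA, h, List.cons_prefix_cons]

-- no digit word is a prefix of another digit word
theorem noPref : ∀ a ∈ wordsA, ∀ b ∈ wordsA, a <+: b → a = b := by decide

-- any key the dict returns a value for is one of the nine words
theorem keyMem (t : List Char) (v : Int) (h : digMapB.get? t = some v) : t ∈ wordsA := by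
  simp only [digMapB, PySem.Dict.get?_insert, PySem.Dict.get?_empty] at h
  split_ifs at h with h1 h2 h3 h4 h5 h6 h7 h8 h9 <;> (subst_vars; decide)

-- the value stored for each word agrees between the two literal dicts
theorem valOf : ∀ w ∈ wordsA, digMapB.get? w = some ((digMapA.get? w).getD 0) := by decide

theorem loopA_hit (ws : List (List Char)) (rest w : List Char)
    (hmem : w ∈ ws) (hr : w <+: rest) (honly : ∀ u ∈ ws, u <+: rest → u = w) :
    loopA ws rest = (true, (digMapA.get? w).getD 0) := by
  induction ws with
  | nil => cases hmem
  | cons u t ih =>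
    by_cases hu : recurWordA u rest = true
    · have hup : u <+: rest := by simpa [recurWordA_eq] using hu
      have : u = w := honly u (List.mem_cons_self ..) hup
      subst this
      simp [loopA, hu]
    · have hne : u ≠ w := fun he => hu (by simp [recurWordA_eq, he ▸ hr])
      have hmem' : w ∈ t := by
        cases List.mem_cons.mp hmem with
        | inl h => exact absurd h.symm hne
        | inr h => exact h
      simp only [loopA, hu, if_false, Bool.false_eq_true]
      exact ih hmem' (fun u hu hp => honly u (List.mem_cons_of_mem _ hu) hp)

theorem loopA_none (ws : List (List Char)) (rest : List Char)
    (h : ∀ u ∈ ws, ¬ u <+: rest) : loopA ws rest = (false, -1) := by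
  induction ws with
  | nil => rfl
  | cons u t ih =>
    have hu : recurWordA u rest = false := by
      simp [recurWordA_eq, h u (List.mem_cons_self ..)]
    simp only [loopA, hu, Bool.false_eq_true, if_false]
    exact ih (fun u hu hp => h u (List.mem_cons_of_mem _ hu) hp)

theorem loopB_hit (lens : List Nat) (rest w : List Char) (v : Int)
    (hv : digMapB.get? w = some v) (hr : w <+: rest)
    (honly : ∀ u ∈ wordsA, u <+: rest → u = w) (hlen : w.length ∈ lens) :
    loopB lens rest = (true, v) := by
  induction lens with
  | nil => cases hlen
  | cons L t ih =>
    cases hg : digMapB.get? (rest.take L) with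
    | some v' =>
      have hk : rest.take L ∈ wordsA := keyMem _ _ hg
      have hw : rest.take L = w := honly _ hk (List.take_prefix L rest)
      have hgw : digMapB.get? (rest.take L) = some v := by rw [hw, hv]
      simp only [loopB, hgw]
    | none =>
      have hLne : L ≠ w.length := by
        intro he
        subst he
        rw [← List.prefix_iff_eq_take.mp hr, hv] at hg
        cases hg
      have hlen' : w.length ∈ t := by
        cases List.mem_cons.mp hlen with
        | inl h => exact absurd h.symm hLne
        | inr h => exact h
      simp only [loopB, hg]
      exact ih hlen'

theorem loopB_none (lens : List Nat) (rest : List Char)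
    (h : ∀ u ∈ wordsA, ¬ u <+: rest) : loopB lens rest = (false, -1) := by
  induction lens with
  | nil => rfl
  | cons L t ih =>
    cases hg : digMapB.get? (rest.take L) with
    | some v' =>
      exact absurd (List.take_prefix L rest) (h _ (keyMem _ _ hg))
    | none =>
      simp only [loopB, hg]
      exact ih

theorem wordLens : ∀ w ∈ wordsA, w.length ∈ [3, 4, 5] := by decide

theorem loop_eq (rest : List Char) : loopA wordsA rest = loopB [3, 4, 5] rest := by
  by_cases hex : ∃ w ∈ wordsA, w <+: rest
  · obtain ⟨w, hwmem, hr⟩ := hex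
    have honly : ∀ u ∈ wordsA, u <+: rest → u = w := by
      intro u hu hp
      rcases List.prefix_or_prefix_of_prefix hp hr with h | h
      · exact noPref u hu w hwmem h
      · exact (noPref w hwmem u hu h).symm
    rw [loopA_hit wordsA rest w hwmem hr honly,
        loopB_hit [3, 4, 5] rest w _ (valOf w hwmem) hr honly (wordLens w hwmem)]
  · push Not at hex
    rw [loopA_none wordsA rest hex, loopB_none [3, 4, 5] rest hex]

-- ===== VERDICT (by name: the statement is the Claim_ definition above) =====
theorem isANum_spec : Claim_equal_isANum := by
  intro line index _ _
  show isANum line index = isANum_alt line index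
  cases hg : PySem.List.pyGet? line.toList index with
  | none => simp [isANum, isANum_alt, hg]
  | some c =>
    simp only [isANum, isANum_alt, hg]
    by_cases hd : PySem.Chars.strIsdigit [c] = true
    · simp [hd]
    · simp only [hd, Bool.false_eq_true, if_false]
      exact loop_eq _
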